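-- pv_equiv track=rewrite | github.com/siddharthshetty08/Fall20-Projects | firstcapturego.py | find_adjacent_cells
-- ===== SOURCE A (Python) =====
-- def find_adjacent_cells(x, y, side_len):
--     """
--     Finds the legal adjacent cells for a given co-ordinate (x,y)
--     :param x int: Row index
--     :param y int : Column index
--     :param side_len int: Length of each side of the baord
--     :return:
--     """
--     neighbours = []
--     for x_neighbour in range(x-1,x+2):
--         for y_neighbour in range(y-1,y+2):
--             if (-1 < x < side_len and -1 < y < side_len and (x != x_neighbour or y != y_neighbour)
--                     and (0 <= x_neighbour < side_len) and (0 <= y_neighbour < side_len)) and (abs(x_neighbour-x) != abs(y_neighbour-y)):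
--                 neighbours.append((x_neighbour,y_neighbour))
--     return neighbours
-- ===== SOURCE B (Python) =====
-- def find_adjacent_cells(x, y, side_len):
--     """Legal orthogonal neighbours of (x, y); [] if (x, y) is off-board."""
--     if not (0 <= x < side_len and 0 <= y < side_len):
--         return []
--     neighbours = []
--     for dx, dy in ((-1, 0), (0, -1), (0, 1), (1, 0)):
--         nx, ny = x + dx, y + dy
--         if 0 <= nx < side_len and 0 <= ny < side_len:
--             neighbours.append((nx, ny))
--     return neighbours
-- ===== Notes on version B (the rewrite author's own statement) =====
-- stated objective: simpler
-- what changed: B guards that (x,y) is on the board once, then enumerates the four orthogonal offsets directly, instead of scanning the 3x3 window and filtering out the centre and diagonals with an abs-difference test inside a nested loop.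
import Mathlib
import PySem

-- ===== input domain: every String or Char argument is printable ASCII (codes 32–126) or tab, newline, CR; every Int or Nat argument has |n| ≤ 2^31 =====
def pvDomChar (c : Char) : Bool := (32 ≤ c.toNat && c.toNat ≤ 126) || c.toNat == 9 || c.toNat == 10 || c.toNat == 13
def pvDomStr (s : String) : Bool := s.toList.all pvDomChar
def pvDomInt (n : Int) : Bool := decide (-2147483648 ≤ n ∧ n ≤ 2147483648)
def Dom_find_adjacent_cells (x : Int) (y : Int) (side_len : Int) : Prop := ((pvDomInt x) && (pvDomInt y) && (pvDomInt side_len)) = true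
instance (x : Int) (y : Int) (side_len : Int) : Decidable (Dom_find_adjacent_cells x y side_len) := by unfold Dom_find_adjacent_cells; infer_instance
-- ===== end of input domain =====

set_option maxHeartbeats 4000000


-- ===== PORT A =====
def find_adjacent_cells (x : Int) (y : Int) (side_len : Int) : List (Int × Int) :=
  (PySem.List.pyRange (x - 1) (x + 2) 1).foldl (fun acc x_neighbour =>
    (PySem.List.pyRange (y - 1) (y + 2) 1).foldl (fun acc2 y_neighbour =>
      if ((-1 < x ∧ x < side_len) ∧ (-1 < y ∧ y < side_len) ∧ (x ≠ x_neighbour ∨ y ≠ y_neighbour)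
            ∧ (0 ≤ x_neighbour ∧ x_neighbour < side_len) ∧ (0 ≤ y_neighbour ∧ y_neighbour < side_len))
          ∧ (x_neighbour - x).natAbs ≠ (y_neighbour - y).natAbs
      then acc2 ++ [(x_neighbour, y_neighbour)] else acc2) acc) []

-- ===== PORT B =====
def find_adjacent_cells_alt (x : Int) (y : Int) (side_len : Int) : List (Int × Int) :=
  if 0 ≤ x ∧ x < side_len ∧ 0 ≤ y ∧ y < side_len then
    ([(-1, 0), (0, -1), (0, 1), (1, 0)] : List (Int × Int)).foldl (fun acc d =>
      let nx := x + d.1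
      let ny := y + d.2
      if 0 ≤ nx ∧ nx < side_len ∧ 0 ≤ ny ∧ ny < side_len then acc ++ [(nx, ny)] else acc) []
  else []

-- ===== PRECONDITION & SPEC =====
def Spec_find_adjacent_cells (x : Int) (y : Int) (side_len : Int) (out : List (Int × Int)) : Prop := out = find_adjacent_cells_alt x y side_len
instance (x : Int) (y : Int) (side_len : Int) (out : List (Int × Int)) : Decidable (Spec_find_adjacent_cells x y side_len out) := by unfold Spec_find_adjacent_cells; infer_instance

-- ===== CLAIM (what is proved, stated in full; the proofs are below) =====
def Claim_equal_find_adjacent_cells : Prop := ∀ (x : Int) (y : Int) (side_len : Int), Dom_find_adjacent_cells x y side_len → Spec_find_adjacent_cells x y side_len (find_adjacent_cells x y side_len)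

-- One honest line: B replaces the 3x3 scan with an on-board guard plus direct enumeration of the four orthogonal offsets (simpler).
-- ===== LEMMAS AND PROOFS =====

-- ===== VERDICT (by name: the statement is the Claim_ definition above) =====
theorem find_adjacent_cells_spec : Claim_equal_find_adjacent_cells := by
  intro x y side_len _
  unfold Spec_find_adjacent_cells find_adjacent_cells find_adjacent_cells_alt
  have h3 : ∀ a : Int, PySem.List.pyRange (a - 1) (a + 2) 1 = [a - 1, a, a + 1] := by
    intro a
    rw [PySem.List.pyRange_one]
    simp [show ((3:Int)).toNat = 3 from rfl, List.range_succ]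
    all_goals omega
  rw [h3, h3]
  simp only [PySem.List.foldl_append_ite, PySem.List.foldl_append_eq_flatMap]
  simp only [List.flatMap_cons, List.flatMap_nil, List.filter_cons, List.filter_nil,
             List.nil_append, List.append_nil, decide_eq_true_eq,
             show x - 1 - x = (-1 : Int) from by ring, show x + 1 - x = (1 : Int) from by ring,
             show y - 1 - y = (-1 : Int) from by ring, show y + 1 - y = (1 : Int) from by ring,
             show x - x = (0 : Int) from by ring, show y - y = (0 : Int) from by ring]
  norm_num
  ring_nf
  split_ifs <;> first | rfl | omega | (norm_num; try omega)
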